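-- pv_equiv track=rewrite | github.com/qn06142/coding-python | move.py | solve
-- ===== SOURCE A (Python) =====
-- import bisect
--
-- def solve(n, m, board):
--
--     row_costs = []
--
--     for row in board:
--         ones = [i for i, ch in enumerate(row) if ch == '1']
--         if not ones:
--             return -1
--         cost = [0] * m
--         for j in range(m):
--
--             pos = bisect.bisect_left(ones, j)
--
--             d1 = abs(ones[pos] - j) if pos < len(ones) else float('inf')
--
--             d2 = abs(j - ones[pos-1]) if pos > 0 else float('inf')
--
--             best = min(d1, d2)
--             best = min(best, m - best)
--             cost[j] = best
--         row_costs.append(cost)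
--
--     ans = float('inf')
--     for j in range(m):
--         total = sum(row_costs[i][j] for i in range(n))
--         ans = min(ans, total)
--     return ans
-- ===== SOURCE B (Python) =====
-- def solve(n, m, board):
--     # B: per row, one merge-style pointer walk over the sorted '1'-positions gives the
--     # nearest-'1' distance for every column without binary search; column totals are
--     # accumulated incrementally, so no n x m cost matrix is built or re-scanned.
--     if any('1' not in row for row in board):
--         return -1
--     totals = [0] * m
--     for row in (board[:n] if n > 0 else []):
--         ones = [i for i, ch in enumerate(row) if ch == '1']
--         k = len(ones)
--         p = 0
--         for j in range(m):
--             while p < k and ones[p] < j: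
--                 p += 1
--             if p < k:
--                 d = ones[p] - j
--                 if p > 0:
--                     d = min(d, j - ones[p - 1])
--             else:
--                 d = j - ones[p - 1]
--             totals[j] += min(d, m - d)
--     return min(totals)
-- ===== Notes on version B (the rewrite author's own statement) =====
-- stated objective: alternative
-- what changed: Per row, a single monotone pointer walk over the sorted '1'-positions replaces the per-column bisect_left calls, and column totals are accumulated incrementally instead of building the n×m row_costs matrix and re-scanning it column by column.
-- outside the precondition, e.g. on solve(1, 0, ['1']): A returns inf, B raises ValueError; on solve(2, 2, ['1']): A raises IndexError, B returns 0
import Mathlib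
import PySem

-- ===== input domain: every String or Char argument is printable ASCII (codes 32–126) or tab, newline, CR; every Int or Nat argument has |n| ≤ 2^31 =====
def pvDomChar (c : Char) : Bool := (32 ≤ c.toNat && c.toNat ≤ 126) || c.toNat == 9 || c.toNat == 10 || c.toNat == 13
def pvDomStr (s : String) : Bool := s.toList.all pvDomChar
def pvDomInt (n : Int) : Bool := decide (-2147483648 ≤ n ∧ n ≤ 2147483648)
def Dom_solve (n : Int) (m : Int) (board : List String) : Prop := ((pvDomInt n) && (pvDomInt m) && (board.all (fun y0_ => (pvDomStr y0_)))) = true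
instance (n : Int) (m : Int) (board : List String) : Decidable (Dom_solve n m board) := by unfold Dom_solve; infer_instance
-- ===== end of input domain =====

-- B replaces A's per-column binary search and n×m cost matrix by one monotone pointer
-- walk over each row's '1'-positions with incrementally accumulated column totals (objective: alternative).

-- ===== PORT A =====
-- [i for i, ch in enumerate(row) if ch == '1']
def onesOf (row : String) : List Int :=
  (PySem.List.enumerate row.toList).filterMap (fun p => if p.2 = '1' then some p.1 else none)

-- body of A's inner j-loop: bisect_left, d1/d2 (float('inf') modelled as none), best
def costA (m : Int) (ones : List Int) (j : Int) : Int :=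
  let pos := PySem.List.bisectLeft ones j
  let d1 : Option Int := if pos < ones.length then some (((ones.getD pos 0) - j).natAbs : Int) else none
  let d2 : Option Int := if 0 < pos then some (((j - ones.getD (pos - 1) 0)).natAbs : Int) else none
  let best : Int :=
    match d1, d2 with
    | some a, some b => min a b
    | some a, none   => a
    | none,  some b  => b
    | none,  none    => 0   -- unreachable in A: ones ≠ [] whenever cost is computed
  min best (m - best)

-- A's first loop: builds row_costs, none = the early 'return -1'
def rowCostsA (m : Int) (board : List String) : Option (List (List Int)) :=
  match board with
  | [] => some []
  | row :: rest =>
    let ones := onesOf row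
    if ones.isEmpty then none
    else
      match rowCostsA m rest with
      | none => none
      | some cs => some ((PySem.List.pyRange 0 m 1).map (fun j => costA m ones j) :: cs)

def solve (n : Int) (m : Int) (board : List String) : Int :=
  match rowCostsA m board with
  | none => -1
  | some rcs =>
    ((PySem.List.pyRange 0 m 1).foldl
      (fun (ans : Option Int) j =>
        let total := (PySem.List.pyRange 0 n 1).foldl
          (fun t i => t + PySem.List.pyGetD (PySem.List.pyGetD rcs i []) j 0) 0
        some (match ans with | none => total | some a => min a total)) none).getD 0
    -- getD's default is reached only for m ≤ 0, where the Python returns float('inf') (excluded by Pre_)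

-- ===== PORT B =====
-- the 'while p < k and ones[p] < j: p += 1' pointer advance (fuel = k - p only makes it total)
def advanceBAux (ones : List Int) (j : Int) : Nat → Nat → Nat
  | 0, p => p
  | fuel + 1, p =>
    if p < ones.length then
      (if ones.getD p 0 < j then advanceBAux ones j fuel (p + 1) else p)
    else p

def advanceB (ones : List Int) (j : Int) (p : Nat) : Nat :=
  advanceBAux ones j (ones.length - p) p

-- body of B's inner j-loop after the while: d from the pointer's two neighbours
def costB (m : Int) (ones : List Int) (j : Int) (p : Nat) : Int :=
  let d : Int :=
    if p < ones.length then
      if 0 < p then min (ones.getD p 0 - j) (j - ones.getD (p - 1) 0)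
      else ones.getD p 0 - j
    else j - ones.getD (p - 1) 0
  min d (m - d)

-- one row of B's main loop: totals[j] += min(d, m - d) for j in range(m)
def rowStepB (m : Int) (totals : List Int) (row : String) : List Int :=
  let ones := onesOf row
  ((PySem.List.pyRange 0 m 1).foldl
    (fun (st : Nat × List Int) j =>
      let p := advanceB ones j st.1
      (p, PySem.List.pySetD st.2 j (PySem.List.pyGetD st.2 j 0 + costB m ones j p)))
    (0, totals)).2

def solve_alt (n : Int) (m : Int) (board : List String) : Int :=
  if board.any (fun row => !(PySem.Str.isIn "1" row)) then -1
  else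
    let rows := if 0 < n then PySem.List.slice board none (some n) else []
    let totals := rows.foldl (rowStepB m) (PySem.List.pyRepeat [(0 : Int)] m)
    (PySem.List.min? totals (fun x => x)).getD 0
    -- getD's default is reached only for m ≤ 0, where the Python raises ValueError (excluded by Pre_)

-- ===== PRECONDITION & SPEC =====
-- Pre_ excludes only inputs on which A yields no Int value: m ≤ 0 with every row containing '1'
-- (A returns float('inf')) and n > len(board) with every row containing '1' (A raises IndexError).
def Pre_solve (n : Int) (m : Int) (board : List String) : Prop :=
  (∃ row ∈ board, '1' ∉ row.toList) ∨ (1 ≤ m ∧ n ≤ (board.length : Int))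
instance (n : Int) (m : Int) (board : List String) : Decidable (Pre_solve n m board) := by
  unfold Pre_solve; infer_instance

def pvWitness_solve : Int × Int × List String := (2, 3, ["101", "010"])

def Spec_solve (n : Int) (m : Int) (board : List String) (out : Int) : Prop := out = solve_alt n m board
instance (n : Int) (m : Int) (board : List String) (out : Int) : Decidable (Spec_solve n m board out) := by unfold Spec_solve; infer_instance

-- ===== CLAIM (what is proved, stated in full; the proofs are below) =====
def Claim_equal_solve : Prop := ∀ (n : Int) (m : Int) (board : List String), Dom_solve n m board → Pre_solve n m board → Spec_solve n m board (solve n m board)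

-- ===== LEMMAS AND PROOFS =====

lemma isIn_one_iff (row : String) :
    PySem.Str.isIn "1" row = true ↔ '1' ∈ row.toList := by
  rw [PySem.Str.isIn_iff_infix]
  constructor
  · rintro ⟨s, t, h⟩
    rw [← h]; simp [show "1".toList = ['1'] from rfl]
  · intro hm
    obtain ⟨s, t, heq⟩ := List.append_of_mem hm
    exact ⟨s, t, by rw [heq]; simp [show "1".toList = ['1'] from rfl]⟩

lemma onesOf_eq_nil_iff (row : String) : onesOf row = [] ↔ '1' ∉ row.toList := by
  unfold onesOf
  rw [List.filterMap_eq_nil_iff]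
  constructor
  · intro h hmem
    have : '1' ∈ (PySem.List.enumerate row.toList 0).map (fun p => p.2) := by
      rw [PySem.List.map_snd_enumerate]; exact hmem
    obtain ⟨p, hp, hp2⟩ := List.mem_map.mp this
    have := h p hp
    rw [hp2] at this
    simp at this
  · intro h p hp
    have hp2 : p.2 ≠ '1' := by
      intro hc
      apply h
      have : p.2 ∈ (PySem.List.enumerate row.toList 0).map (fun q => q.2) :=
        List.mem_map.mpr ⟨p, hp, rfl⟩
      rw [PySem.List.map_snd_enumerate] at this
      rw [← hc]; exact this
    simp [hp2]

lemma onesOf_sorted (row : String) : (onesOf row).Pairwise (· ≤ ·) := by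
  unfold onesOf
  rw [List.pairwise_filterMap]
  refine (PySem.List.pairwise_lt_enumerate row.toList 0).imp ?_
  intro a b hab x hx y hy
  by_cases ha : a.2 = '1' <;> simp [ha] at hx
  by_cases hb : b.2 = '1' <;> simp [hb] at hy
  rw [← hx, ← hy]; exact le_of_lt hab

lemma advanceBAux_eq_bisect (ones : List Int) (hs : ones.Pairwise (· ≤ ·)) (j : Int) :
    ∀ (fuel p : Nat), ones.length - p ≤ fuel → p ≤ ones.length →
      (∀ q (hq : q < ones.length), q < p → ones[q] < j) →
      advanceBAux ones j fuel p = PySem.List.bisectLeft ones j := by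
  obtain ⟨hble, hbefore, hafter⟩ := PySem.List.bisectLeft_spec ones j hs
  intro fuel
  induction fuel with
  | zero =>
    intro p hf hp hlt
    have hpl : p = ones.length := by omega
    simp only [advanceBAux]
    -- p = length: bisectLeft = length
    have h1 : PySem.List.bisectLeft ones j ≤ p := by omega
    have h2 : p ≤ PySem.List.bisectLeft ones j := by
      by_contra hc
      push_neg at hc
      have hb : PySem.List.bisectLeft ones j < ones.length := by omega
      have := hlt _ hb (by omega)
      have := hafter _ hb (le_refl _)
      omega
    omega
  | succ fuel ih =>
    intro p hf hp hlt
    simp only [advanceBAux]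
    by_cases hpl : p < ones.length
    · rw [if_pos hpl]
      by_cases hg : ones.getD p 0 < j
      · rw [if_pos hg]
        apply ih (p + 1) (by omega) (by omega)
        intro q hq hqp
        rcases Nat.lt_or_ge q p with h | h
        · exact hlt q hq h
        · have hqe : q = p := by omega
          subst hqe
          rwa [List.getD_eq_getElem ones 0 hq] at hg
      · rw [if_neg hg]
        rw [List.getD_eq_getElem ones 0 hpl] at hg
        push_neg at hg
        have h1 : p ≤ PySem.List.bisectLeft ones j := by
          by_contra hc
          push_neg at hc
          have hb : PySem.List.bisectLeft ones j < ones.length := by omega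
          have := hlt _ hb (by omega)
          have := hafter _ hb (le_refl _)
          omega
        have h2 : PySem.List.bisectLeft ones j ≤ p := by
          by_contra hc
          push_neg at hc
          have := hbefore p hpl hc
          omega
        omega
    · rw [if_neg hpl]
      have hpe : p = ones.length := by omega
      have h2 : p ≤ PySem.List.bisectLeft ones j := by
        by_contra hc
        push_neg at hc
        have hb : PySem.List.bisectLeft ones j < ones.length := by omega
        have := hlt _ hb (by omega)
        have := hafter _ hb (le_refl _)
        omega
      omega

lemma advanceB_eq_bisect (ones : List Int) (hs : ones.Pairwise (· ≤ ·)) (j : Int)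
    (p : Nat) (hp : p ≤ ones.length)
    (hlt : ∀ q (hq : q < ones.length), q < p → ones[q] < j) :
    advanceB ones j p = PySem.List.bisectLeft ones j :=
  advanceBAux_eq_bisect ones hs j (ones.length - p) p (le_refl _) hp hlt

lemma costB_eq_costA (m : Int) (ones : List Int) (hs : ones.Pairwise (· ≤ ·))
    (hne : ones ≠ []) (j : Int) :
    costB m ones j (PySem.List.bisectLeft ones j) = costA m ones j := by
  obtain ⟨hble, hbefore, hafter⟩ := PySem.List.bisectLeft_spec ones j hs
  have hlen : 0 < ones.length := List.length_pos_of_ne_nil hne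
  unfold costB costA
  set pos := PySem.List.bisectLeft ones j with hpos
  by_cases h1 : pos < ones.length
  · have hup : ones.getD pos 0 = ones[pos] := List.getD_eq_getElem ones 0 h1
    have hge : j ≤ ones[pos] := hafter pos h1 (le_refl _)
    have habs1 : ((ones.getD pos 0 - j).natAbs : Int) = ones.getD pos 0 - j := by
      rw [hup]; exact Int.natAbs_of_nonneg (by omega)
    by_cases h2 : 0 < pos
    · have hpm : pos - 1 < ones.length := by omega
      have hup2 : ones.getD (pos - 1) 0 = ones[pos - 1] := List.getD_eq_getElem ones 0 hpm
      have hlt2 : ones[pos - 1] < j := hbefore (pos - 1) hpm (by omega)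
      have habs2 : ((j - ones.getD (pos - 1) 0).natAbs : Int) = j - ones.getD (pos - 1) 0 := by
        rw [hup2]; exact Int.natAbs_of_nonneg (by omega)
      simp only [if_pos h1, if_pos h2, habs1, habs2]
    · simp only [if_pos h1, if_neg h2, habs1]
  · have hpe : pos = ones.length := by omega
    have h2 : 0 < pos := by omega
    have hpm : pos - 1 < ones.length := by omega
    have hup2 : ones.getD (pos - 1) 0 = ones[pos - 1] := List.getD_eq_getElem ones 0 hpm
    have hlt2 : ones[pos - 1] < j := hbefore (pos - 1) hpm (by omega)
    have habs2 : ((j - ones.getD (pos - 1) 0).natAbs : Int) = j - ones.getD (pos - 1) 0 := by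
      rw [hup2]; exact Int.natAbs_of_nonneg (by omega)
    simp only [if_neg h1, if_pos h2, habs2]

lemma innerFold_spec (m : Int) (ones : List Int) (hs : ones.Pairwise (· ≤ ·)) (hne : ones ≠ []) :
    ∀ (fuel : Nat) (a : Int) (p : Nat) (tot : List Int), (m - a).toNat ≤ fuel → 0 ≤ a →
      m.toNat ≤ tot.length →
      p ≤ ones.length → (∀ q (hq : q < ones.length), q < p → ones[q] < a) →
      (((PySem.List.pyRange a m 1).foldl
        (fun (st : Nat × List Int) j =>
          (advanceB ones j st.1,
           PySem.List.pySetD st.2 j (PySem.List.pyGetD st.2 j 0 + costB m ones j (advanceB ones j st.1))))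
        (p, tot)).2.length = tot.length ∧
       ∀ (i : Nat) (hi : i < tot.length),
        (((PySem.List.pyRange a m 1).foldl
        (fun (st : Nat × List Int) j =>
          (advanceB ones j st.1,
           PySem.List.pySetD st.2 j (PySem.List.pyGetD st.2 j 0 + costB m ones j (advanceB ones j st.1))))
        (p, tot)).2)[i]? =
          some (if a ≤ (i : Int) ∧ (i : Int) < m then tot[i] + costA m ones i else tot[i])) := by
  intro fuel
  induction fuel with
  | zero =>
    intro a p tot hf ha hlen hp hlt
    have hma : m ≤ a := by omega
    rw [PySem.List.pyRange_one_eq_nil hma]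
    simp only [List.foldl_nil]
    constructor
    · trivial
    · intro i hi
      rw [if_neg (by omega)]
      exact List.getElem?_eq_getElem hi
  | succ fuel ih =>
    intro a p tot hf ha hlen hp hlt
    by_cases ham : a < m
    · rw [PySem.List.pyRange_one_cons ham]
      simp only [List.foldl_cons]
      have hadv : advanceB ones a p = PySem.List.bisectLeft ones a :=
        advanceB_eq_bisect ones hs a p hp hlt
      obtain ⟨hble, hbefore, hafter⟩ := PySem.List.bisectLeft_spec ones a hs
      have hcost : costB m ones a (advanceB ones a p) = costA m ones a := by
        rw [hadv]; exact costB_eq_costA m ones hs hne a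
      have hatn : a.toNat < tot.length := by omega
      have hgd : tot.getD a.toNat 0 = tot[a.toNat] := List.getD_eq_getElem tot 0 hatn
      have hset : PySem.List.pySetD tot a (PySem.List.pyGetD tot a 0 + costB m ones a (PySem.List.bisectLeft ones a))
          = tot.set a.toNat (tot.getD a.toNat 0 + costA m ones a) := by
        rw [PySem.List.pySetD_of_nonneg tot _ ha, PySem.List.pyGetD_of_nonneg tot 0 ha,
          costB_eq_costA m ones hs hne a]
      rw [hadv, hset]
      obtain ⟨ihlen, ihget⟩ := ih (a + 1) (PySem.List.bisectLeft ones a)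
        (tot.set a.toNat (tot.getD a.toNat 0 + costA m ones a))
        (by omega) (by omega) (by simpa using hlen) hble
        (by
          intro q hq hqb
          have := hbefore q hq hqb
          omega)
      constructor
      · rw [ihlen]; simp
      · intro i hi
        have hi' : i < (tot.set a.toNat (tot.getD a.toNat 0 + costA m ones a)).length := by simpa using hi
        rw [ihget i hi']
        by_cases hia : i = a.toNat
        · subst hia
          rw [if_neg (by omega), if_pos (by omega)]
          have hcast : ((a.toNat : Int)) = a := by omega
          rw [List.getElem_set_self, hgd, hcast]
        · rw [List.getElem_set_ne (by omega)]
          have heq : ((a + 1 ≤ (i : Int) ∧ (i : Int) < m)) ↔ ((a ≤ (i : Int) ∧ (i : Int) < m)) := by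
            omega
          rw [if_congr heq rfl rfl]
    · rw [PySem.List.pyRange_one_eq_nil (by omega)]
      simp only [List.foldl_nil]
      constructor
      · trivial
      · intro i hi
        rw [if_neg (by omega)]
        exact List.getElem?_eq_getElem hi

lemma rowsFold_spec (m : Int) :
    ∀ (rows : List String) (tot : List Int), (∀ row ∈ rows, '1' ∈ row.toList) →
      m.toNat ≤ tot.length →
      ((rows.foldl (rowStepB m) tot).length = tot.length ∧
       ∀ (i : Nat) (hi : i < tot.length),
        (rows.foldl (rowStepB m) tot)[i]? =
          some (if (i : Int) < m then tot[i] + (rows.map (fun row => costA m (onesOf row) i)).sum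
          else tot[i])) := by
  intro rows
  induction rows with
  | nil =>
    intro tot hall hlen
    constructor
    · rfl
    · intro i hi
      simp only [List.foldl_nil, List.map_nil, List.sum_nil, add_zero]
      rw [List.getElem?_eq_getElem hi]
      split_ifs <;> rfl
  | cons row rest ih =>
    intro tot hall hlen
    have hone : '1' ∈ row.toList := hall row List.mem_cons_self
    have hne : onesOf row ≠ [] := by
      intro hc
      exact (onesOf_eq_nil_iff row).mp hc hone
    have hs := onesOf_sorted row
    simp only [List.foldl_cons]
    obtain ⟨flen, fget⟩ := innerFold_spec m (onesOf row) hs hne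
      (m - 0).toNat 0 0 tot (le_refl _) (le_refl 0) hlen (Nat.zero_le _)
      (by intro q hq hq0; omega)
    have hstep : rowStepB m tot row =
        ((PySem.List.pyRange 0 m 1).foldl
          (fun (st : Nat × List Int) j =>
            (advanceB (onesOf row) j st.1,
             PySem.List.pySetD st.2 j (PySem.List.pyGetD st.2 j 0 + costB m (onesOf row) j (advanceB (onesOf row) j st.1))))
          (0, tot)).2 := rfl
    obtain ⟨ihlen, ihget⟩ := ih (rowStepB m tot row)
      (fun r hr => hall r (List.mem_cons_of_mem row hr))
      (by rw [hstep, flen]; exact hlen)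
    refine ⟨by rw [ihlen, hstep, flen], ?_⟩
    intro i hi
    have hi1 : i < (rowStepB m tot row).length := by rw [hstep, flen]; exact hi
    rw [ihget i hi1]
    have hq : (rowStepB m tot row)[i]? =
        some (if 0 ≤ (i : Int) ∧ (i : Int) < m then tot[i] + costA m (onesOf row) i else tot[i]) := by
      rw [hstep]; exact fget i hi
    rw [List.getElem?_eq_getElem hi1] at hq
    have hmid := Option.some.inj hq
    rw [hmid]
    simp only [List.map_cons, List.sum_cons]
    by_cases him : (i : Int) < m
    · rw [if_pos him, if_pos ⟨Int.natCast_nonneg i, him⟩, if_pos him]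
      ring
    · rw [if_neg him, if_neg (by omega), if_neg him]

lemma rowCostsA_eq_none_iff (m : Int) (board : List String) :
    rowCostsA m board = none ↔ ∃ row ∈ board, onesOf row = [] := by
  induction board with
  | nil => simp [rowCostsA]
  | cons row rest ih =>
    simp only [rowCostsA]
    by_cases h : (onesOf row).isEmpty
    · rw [if_pos h]
      simp only [List.isEmpty_iff] at h
      simp [h]
    · rw [if_neg h]
      simp only [List.isEmpty_iff] at h
      cases hr : rowCostsA m rest with
      | none =>
        simp only [true_iff]
        obtain ⟨r, hr1, hr2⟩ := ih.mp hr
        exact ⟨r, List.mem_cons_of_mem row hr1, hr2⟩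
      | some cs =>
        simp only [reduceCtorEq, false_iff]
        rintro ⟨r, hr1, hr2⟩
        rcases List.mem_cons.mp hr1 with h1 | h1
        · rw [h1] at hr2; exact h hr2
        · have := ih.mpr ⟨r, h1, hr2⟩
          rw [hr] at this
          exact Option.some_ne_none cs this

lemma rowCostsA_eq_some (m : Int) (board : List String)
    (h : ∀ row ∈ board, onesOf row ≠ []) :
    rowCostsA m board = some (board.map (fun row => (PySem.List.pyRange 0 m 1).map (fun j => costA m (onesOf row) j))) := by
  induction board with
  | nil => simp [rowCostsA]
  | cons row rest ih =>
    simp only [rowCostsA]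
    have h1 : ¬ (onesOf row).isEmpty := by
      rw [List.isEmpty_iff]
      exact h row List.mem_cons_self
    rw [if_neg h1, ih (fun r hr => h r (List.mem_cons_of_mem row hr))]
    simp

lemma optMinFold (T : Int → Int) :
    ∀ (t : List Int) (a : Int),
      t.foldl (fun ans j => some (match ans with | none => T j | some x => min x (T j))) (some a)
      = some (t.foldl (fun x j => min x (T j)) a) := by
  intro t
  induction t with
  | nil => intro a; rfl
  | cons x t ih => intro a; simp only [List.foldl_cons]; exact ih (min a (T x))

lemma colTotal_eq_sum (m n : Int) (board : List String) (j : Int)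
    (hn : n ≤ (board.length : Int)) (hj0 : 0 ≤ j) (hjm : j < m) :
    (PySem.List.pyRange 0 n 1).foldl
      (fun t i => t + PySem.List.pyGetD
        (PySem.List.pyGetD (board.map (fun row => (PySem.List.pyRange 0 m 1).map (fun j => costA m (onesOf row) j))) i [])
        j 0) 0
    = ((board.take n.toNat).map (fun row => costA m (onesOf row) j)).sum := by
  rw [PySem.List.foldl_add]
  rw [zero_add]
  congr 1
  apply List.ext_getElem
  · rw [List.length_map, List.length_map, PySem.List.length_pyRange_one, List.length_take]
    omega
  · intro k h1 h2
    simp only [List.getElem_map]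
    rw [PySem.List.getElem_pyRange_one]
    have hk : k < n.toNat := by
      rw [List.length_map, PySem.List.length_pyRange_one] at h1
      omega
    have hkb : k < board.length := by omega
    rw [zero_add]
    rw [PySem.List.pyGetD_natCast]
    rw [List.getD_eq_getElem _ _ (by simpa using hkb)]
    simp only [List.getElem_map]
    rw [PySem.List.pyGetD_map_pyRange_of_nonneg _ _ _ _ hj0 hjm]
    rw [List.getElem_take]

-- ===== VERDICT (by name: the statement is the Claim_ definition above) =====
theorem solve_spec : Claim_equal_solve := by
  intro n m board _ hpre
  unfold Spec_solve
  by_cases hx : ∃ row ∈ board, '1' ∉ row.toList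
  · -- some row has no '1': both return -1
    obtain ⟨row, hrow, hnone⟩ := hx
    have hA : rowCostsA m board = none :=
      (rowCostsA_eq_none_iff m board).mpr ⟨row, hrow, (onesOf_eq_nil_iff row).mpr hnone⟩
    have hB : board.any (fun r => !(PySem.Str.isIn "1" r)) = true := by
      rw [List.any_eq_true]
      refine ⟨row, hrow, ?_⟩
      rw [Bool.not_eq_true']
      rw [← Bool.not_eq_true]
      intro hc
      exact hnone ((isIn_one_iff row).mp hc)
    unfold solve solve_alt
    rw [hA, if_pos hB]
  · -- every row has a '1'
    push_neg at hx
    have hpre2 : 1 ≤ m ∧ n ≤ (board.length : Int) := by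
      rcases hpre with h | h
      · obtain ⟨row, hrow, hnone⟩ := h
        exact absurd (hx row hrow) hnone
      · exact h
    obtain ⟨hm, hn⟩ := hpre2
    have hB : board.any (fun r => !(PySem.Str.isIn "1" r)) = false := by
      rw [List.any_eq_false]
      intro r hr
      rw [Bool.not_eq_true, Bool.not_eq_false']
      exact (isIn_one_iff r).mpr (hx r hr)
    have hA : rowCostsA m board = some (board.map (fun row => (PySem.List.pyRange 0 m 1).map (fun j => costA m (onesOf row) j))) :=
      rowCostsA_eq_some m board (fun r hr hc => (onesOf_eq_nil_iff r).mp hc (hx r hr))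
    -- B's rows are board[:n] = board.take n.toNat in both branches
    have hrows : (if 0 < n then PySem.List.slice board none (some n) else []) = board.take n.toNat := by
      by_cases hn0 : 0 < n
      · rw [if_pos hn0, PySem.List.slice_to board (by omega)]
      · rw [if_neg hn0]
        have : n.toNat = 0 := by omega
        rw [this, List.take_zero]
    set T : Int → Int := fun j => ((board.take n.toNat).map (fun row => costA m (onesOf row) j)).sum with hT
    -- B's totals list is the per-column sums
    have hlenrep : ((PySem.List.pyRepeat [(0 : Int)] m)).length = m.toNat := by
      rw [PySem.List.pyRepeat_singleton, List.length_replicate]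
    obtain ⟨blen, bget⟩ := rowsFold_spec m (board.take n.toNat) (PySem.List.pyRepeat [(0 : Int)] m)
      (fun r hr => hx r (List.mem_of_mem_take hr))
      (by rw [hlenrep])
    have htotals : (board.take n.toNat).foldl (rowStepB m) (PySem.List.pyRepeat [(0 : Int)] m)
        = (PySem.List.pyRange 0 m 1).map T := by
      apply List.ext_getElem
      · rw [blen, hlenrep, List.length_map, PySem.List.length_pyRange_one]
        omega
      · intro k h1 h2
        have hk : k < m.toNat := by rw [blen, hlenrep] at h1; exact h1
        have hkl : k < (PySem.List.pyRepeat [(0 : Int)] m).length := by rw [hlenrep]; exact hk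
        have hsome := bget k hkl
        rw [List.getElem?_eq_getElem h1] at hsome
        have hval := Option.some.inj hsome
        rw [hval]
        rw [if_pos (by omega)]
        have hrep0 : (PySem.List.pyRepeat [(0 : Int)] m)[k] = 0 := by
          simp [PySem.List.pyRepeat_singleton]
        rw [hrep0, zero_add]
        simp only [List.getElem_map]
        rw [PySem.List.getElem_pyRange_one, zero_add]
    -- A's per-column total is T j
    have hfold : (PySem.List.pyRange 0 m 1).foldl
        (fun (ans : Option Int) j =>
          some (match ans with
            | none => (PySem.List.pyRange 0 n 1).foldl
                (fun t i => t + PySem.List.pyGetD (PySem.List.pyGetD (board.map (fun row => (PySem.List.pyRange 0 m 1).map (fun j => costA m (onesOf row) j))) i []) j 0) 0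
            | some a => min a ((PySem.List.pyRange 0 n 1).foldl
                (fun t i => t + PySem.List.pyGetD (PySem.List.pyGetD (board.map (fun row => (PySem.List.pyRange 0 m 1).map (fun j => costA m (onesOf row) j))) i []) j 0) 0))) none
        = (PySem.List.pyRange 0 m 1).foldl
          (fun (ans : Option Int) j => some (match ans with | none => T j | some a => min a (T j))) none := by
      apply PySem.List.foldl_congr_mem
      intro acc j hjmem
      have hjb := (PySem.List.mem_pyRange_one).mp hjmem
      rw [colTotal_eq_sum m n board j hn hjb.1 hjb.2]
    simp only [solve, solve_alt, hA, hB, Bool.false_eq_true, if_false, hrows]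
    rw [htotals, hfold]
    rw [PySem.List.pyRange_one_cons (show (0:Int) < m by omega)]
    simp only [List.foldl_cons, List.map_cons]
    rw [optMinFold T]
    rw [PySem.List.min?_id_cons]
    rw [List.foldl_map]
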